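-- pv_equiv track=rewrite | github.com/fishkiler/fine-tune-mdr | scripts/sources/fetch_attack_logs.py | compose_sigma_explain_answer
-- ===== SOURCE A (Python) =====
-- def compose_sigma_explain_answer(rule_yaml: str, technique_id: str) -> str:
--     """Compose an explanation of an existing Sigma rule."""
--     # Parse basic fields from the YAML
--     title = _yaml_field(rule_yaml, "title") or "Unknown"
--     description = _yaml_field(rule_yaml, "description") or ""
--     level = _yaml_field(rule_yaml, "level") or "medium"
--     status = _yaml_field(rule_yaml, "status") or "unknown"
--
--     parts = [
--         f"**Rule: {title}**",
--         "",
--         f"**Purpose:** {description[:300]}" if description else "**Purpose:** Detection rule for security threats",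
--         "",
--         "**Detection Logic Breakdown:**",
--     ]
--
--     # Parse detection section
--     in_detection = False
--     detection_lines = []
--     for line in rule_yaml.splitlines():
--         stripped = line.strip()
--         if stripped.startswith("detection:"):
--             in_detection = True
--             continue
--         if in_detection:
--             if stripped and not stripped.startswith("#") and not stripped.startswith("-") and ":" in stripped and not line.startswith(" "):
--                 break
--             detection_lines.append(line)
--
--     if detection_lines:
--         parts.append("```yaml")
--         parts.extend(detection_lines[:15])
--         parts.append("```")
--         parts.append("")
--
--     # Explain the detection
--     parts.extend([
--         "The rule works by matching specific field values in the log source. "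
--         "When the `condition` evaluates to true, an alert is generated.",
--         "",
--         f"**MITRE ATT&CK Mapping:** {technique_id}",
--         f"**Severity Level:** {level.upper()}",
--         f"**Rule Status:** {status}",
--         "",
--         "**False Positive Considerations:**",
--     ])
--
--     # Extract false positives from rule
--     in_fp = False
--     fp_found = False
--     for line in rule_yaml.splitlines():
--         stripped = line.strip()
--         if stripped.startswith("falsepositives:"):
--             in_fp = True
--             continue
--         if in_fp:
--             if stripped.startswith("- "):
--                 parts.append(f"- {stripped[2:]}")
--                 fp_found = True
--             elif stripped and not stripped.startswith("#"):
--                 break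
--
--     if not fp_found:
--         parts.append("- Legitimate administrative activity matching the detection pattern")
--
--     return "\n".join(parts)
--
-- def _yaml_field(yaml_text: str, field_name: str) -> str | None:
--     """Extract a top-level YAML field value (simple string parsing)."""
--     for line in yaml_text.splitlines():
--         if line.startswith(f"{field_name}:"):
--             val = line.split(":", 1)[1].strip()
--             return val.strip("'\"") if val else None
--     return None
-- ===== SOURCE B (Python) =====
-- def compose_sigma_explain_answer(rule_yaml: str, technique_id: str) -> str:
--     """Compose an explanation of an existing Sigma rule (single-pass scan)."""
--     # one pass over the lines: first-match top-level fields, detection block, false positives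
--     fields = {"title": None, "description": None, "level": None, "status": None}
--     in_det = det_done = False
--     det_lines = []
--     in_fp = fp_done = False
--     fp_lines = []
--     for line in rule_yaml.splitlines():
--         stripped = line.strip()
--         for name in fields:
--             if fields[name] is None and line.startswith(name + ":"):
--                 val = line.split(":", 1)[1].strip()
--                 fields[name] = (val.strip("'\"") if val else None,)
--         if not det_done:
--             if stripped.startswith("detection:"):
--                 in_det = True
--             elif in_det:
--                 if (stripped and not stripped.startswith("#")
--                         and not stripped.startswith("-") and ":" in stripped
--                         and not line.startswith(" ")):
--                     det_done = True
--                 else: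
--                     det_lines.append(line)
--         if not fp_done:
--             if stripped.startswith("falsepositives:"):
--                 in_fp = True
--             elif in_fp:
--                 if stripped.startswith("- "):
--                     fp_lines.append("- " + stripped[2:])
--                 elif stripped and not stripped.startswith("#"):
--                     fp_done = True
--
--     def get(name, default):
--         v = fields[name]
--         return (v[0] or default) if v is not None else default
--
--     title = get("title", "Unknown")
--     description = get("description", "")
--     level = get("level", "medium")
--     status = get("status", "unknown")
--
--     parts = [
--         f"**Rule: {title}**",
--         "",
--         f"**Purpose:** {description[:300]}" if description else "**Purpose:** Detection rule for security threats",
--         "",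
--         "**Detection Logic Breakdown:**",
--     ]
--     if det_lines:
--         parts += ["```yaml", *det_lines[:15], "```", ""]
--     parts += [
--         "The rule works by matching specific field values in the log source. "
--         "When the `condition` evaluates to true, an alert is generated.",
--         "",
--         f"**MITRE ATT&CK Mapping:** {technique_id}",
--         f"**Severity Level:** {level.upper()}",
--         f"**Rule Status:** {status}",
--         "",
--         "**False Positive Considerations:**",
--     ]
--     parts += fp_lines
--     if not fp_lines:
--         parts.append("- Legitimate administrative activity matching the detection pattern")
--     return "\n".join(parts)
-- ===== Notes on version B (the rewrite author's own statement) =====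
-- stated objective: alternative
-- what changed: B replaces A's six separate scans of the YAML text (four _yaml_field line scans plus the detection loop and the false-positive loop) with a single pass over splitlines() that carries a combined state: first-match field slots, in_detection/detection_done with collected lines, and in_fp/fp_done with collected false positives; the assembly and fallbacks are unchanged.
import Mathlib
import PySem

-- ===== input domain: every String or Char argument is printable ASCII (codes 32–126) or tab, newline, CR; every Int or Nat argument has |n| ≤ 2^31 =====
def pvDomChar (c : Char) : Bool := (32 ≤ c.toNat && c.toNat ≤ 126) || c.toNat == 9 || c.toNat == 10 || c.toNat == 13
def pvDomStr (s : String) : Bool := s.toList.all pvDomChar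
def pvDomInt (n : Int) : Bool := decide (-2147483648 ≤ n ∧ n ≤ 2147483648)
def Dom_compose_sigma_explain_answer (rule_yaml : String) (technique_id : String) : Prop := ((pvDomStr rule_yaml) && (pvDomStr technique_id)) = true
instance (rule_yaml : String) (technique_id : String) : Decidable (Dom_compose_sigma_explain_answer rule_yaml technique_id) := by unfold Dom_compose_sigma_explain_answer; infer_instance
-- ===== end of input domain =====

-- B re-implements A as ONE pass over rule_yaml.splitlines() carrying a combined state
-- (first-match fields, detection flags+lines, false-positive flags+lines) instead of A's
-- six separate scans (four _yaml_field calls plus two loops); objective: alternative decomposition.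


-- ===== shared helpers (the same expressions appear verbatim in both Pythons) =====

-- value computed from a line that startswith "<field>:":
-- line.split(":", 1)[1].strip(), then strip("'\"") if non-empty else None.
-- (the [1] is guarded by startswith, so the getD defaults are unreachable)
def pvFieldVal (line : String) : Option String :=
  let val := PySem.Str.strip ((((PySem.Str.splitMax? line ":" 1).getD [])).getD 1 "")
  if val ≠ "" then some (PySem.Str.stripChars val "'\"") else none

-- Python's `<opt> or <default>` for a str|None value
def pvOrDefault (v : Option String) (d : String) : String :=
  match v with
  | none => d
  | some s => if s = "" then d else s

-- named branch conditions (both Pythons test these literal conditions)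
def pvIsField (field line : String) : Bool := PySem.Str.startswith line (field ++ ":")
def pvIsDet (stripped : String) : Bool := PySem.Str.startswith stripped "detection:"
def pvIsFp (stripped : String) : Bool := PySem.Str.startswith stripped "falsepositives:"
def pvIsDash (stripped : String) : Bool := PySem.Str.startswith stripped "- "

-- the detection-section break condition of both Pythons
def pvDetBreak (line stripped : String) : Bool :=
  stripped ≠ "" && !PySem.Str.startswith stripped "#" && !PySem.Str.startswith stripped "-"
    && PySem.Str.isIn ":" stripped && !PySem.Str.startswith line " "

-- the false-positive break condition of both Pythons
def pvFpBreak (stripped : String) : Bool :=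
  stripped ≠ "" && !PySem.Str.startswith stripped "#"

-- ===== PORT A =====

-- _yaml_field: first line with line.startswith(f"{field_name}:") decides the result
def yamlFieldGo (field : String) : List String → Option String
  | [] => none
  | line :: rest =>
    if pvIsField field line then pvFieldVal line
    else yamlFieldGo field rest

def yamlField (yamlText field : String) : Option String :=
  yamlFieldGo field (PySem.Str.splitlines yamlText)

-- A's detection loop (break returns what was collected so far)
def detLoopA (inDet : Bool) : List String → List String
  | [] => []
  | line :: rest =>
    let stripped := PySem.Str.strip line
    if pvIsDet stripped then detLoopA true rest
    else if inDet then
      if pvDetBreak line stripped then [] else line :: detLoopA inDet rest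
    else detLoopA inDet rest

-- A's false-positive loop: collected "- …" parts, and fp_found
def fpLoopA (inFp : Bool) : List String → List String × Bool
  | [] => ([], false)
  | line :: rest =>
    let stripped := PySem.Str.strip line
    if pvIsFp stripped then fpLoopA true rest
    else if inFp then
      if pvIsDash stripped then
        let r := fpLoopA inFp rest
        (("- " ++ PySem.Str.slice stripped (some 2) none) :: r.1, true)
      else if pvFpBreak stripped then ([], false)
      else fpLoopA inFp rest
    else fpLoopA inFp rest

def compose_sigma_explain_answer (rule_yaml : String) (technique_id : String) : String :=
  let title := pvOrDefault (yamlField rule_yaml "title") "Unknown"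
  let description := pvOrDefault (yamlField rule_yaml "description") ""
  let level := pvOrDefault (yamlField rule_yaml "level") "medium"
  let status := pvOrDefault (yamlField rule_yaml "status") "unknown"
  let parts : List String :=
    ["**Rule: " ++ title ++ "**",
     "",
     (if description ≠ "" then "**Purpose:** " ++ PySem.Str.slice description none (some 300)
      else "**Purpose:** Detection rule for security threats"),
     "",
     "**Detection Logic Breakdown:**"]
  let detection_lines := detLoopA false (PySem.Str.splitlines rule_yaml)
  let parts := if !detection_lines.isEmpty then
      parts ++ ["```yaml"] ++ PySem.List.slice detection_lines none (some 15) ++ ["```", ""]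
    else parts
  let parts := parts ++
    ["The rule works by matching specific field values in the log source. When the `condition` evaluates to true, an alert is generated.",
     "",
     "**MITRE ATT&CK Mapping:** " ++ technique_id,
     "**Severity Level:** " ++ PySem.Str.upper level,
     "**Rule Status:** " ++ status,
     "",
     "**False Positive Considerations:**"]
  let fp := fpLoopA false (PySem.Str.splitlines rule_yaml)
  let parts := parts ++ fp.1
  let parts := if !fp.2 then parts ++ ["- Legitimate administrative activity matching the detection pattern"] else parts
  PySem.Str.join "\n" parts

-- ===== PORT B =====

-- one first-match field slot: none = not seen yet; some r = decided (r as _yaml_field would return)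
def fStepB (field : String) (s : Option (Option String)) (line : String) : Option (Option String) :=
  match s with
  | some v => some v
  | none => if pvIsField field line then some (pvFieldVal line) else none

-- detection component of the single-pass state: (in_det, det_done, det_lines)
def dStepB (s : Bool × Bool × List String) (line : String) : Bool × Bool × List String :=
  let stripped := PySem.Str.strip line
  if s.2.1 then s
  else if pvIsDet stripped then (true, false, s.2.2)
  else if s.1 then
    if pvDetBreak line stripped then (s.1, true, s.2.2)
    else (s.1, false, s.2.2 ++ [line])
  else s

-- false-positive component: (in_fp, fp_done, fp_lines)
def pStepB (s : Bool × Bool × List String) (line : String) : Bool × Bool × List String :=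
  let stripped := PySem.Str.strip line
  if s.2.1 then s
  else if pvIsFp stripped then (true, false, s.2.2)
  else if s.1 then
    if pvIsDash stripped then
      (s.1, false, s.2.2 ++ ["- " ++ PySem.Str.slice stripped (some 2) none])
    else if pvFpBreak stripped then (s.1, true, s.2.2)
    else s
  else s

def BState := (Option (Option String) × Option (Option String) × Option (Option String) × Option (Option String))
  × (Bool × Bool × List String) × (Bool × Bool × List String)

def bStepB (s : BState) (line : String) : BState :=
  ((fStepB "title" s.1.1 line, fStepB "description" s.1.2.1 line,
    fStepB "level" s.1.2.2.1 line, fStepB "status" s.1.2.2.2 line),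
   dStepB s.2.1 line, pStepB s.2.2 line)

-- fields[name] fallback: (v[0] or default) if v is not None else default
def pvGetB (v : Option (Option String)) (d : String) : String :=
  match v with
  | none => d
  | some r => pvOrDefault r d

def compose_sigma_explain_answer_alt (rule_yaml : String) (technique_id : String) : String :=
  let s : BState := (((none, none, none, none)), (false, false, []), (false, false, []))
  let s := (PySem.Str.splitlines rule_yaml).foldl bStepB s
  let title := pvGetB s.1.1 "Unknown"
  let description := pvGetB s.1.2.1 ""
  let level := pvGetB s.1.2.2.1 "medium"
  let status := pvGetB s.1.2.2.2 "unknown"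
  let det_lines := s.2.1.2.2
  let fp_lines := s.2.2.2.2
  let parts : List String :=
    ["**Rule: " ++ title ++ "**",
     "",
     (if description ≠ "" then "**Purpose:** " ++ PySem.Str.slice description none (some 300)
      else "**Purpose:** Detection rule for security threats"),
     "",
     "**Detection Logic Breakdown:**"]
  let parts := if !det_lines.isEmpty then
      parts ++ ["```yaml"] ++ PySem.List.slice det_lines none (some 15) ++ ["```", ""]
    else parts
  let parts := parts ++
    ["The rule works by matching specific field values in the log source. When the `condition` evaluates to true, an alert is generated.",
     "",
     "**MITRE ATT&CK Mapping:** " ++ technique_id,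
     "**Severity Level:** " ++ PySem.Str.upper level,
     "**Rule Status:** " ++ status,
     "",
     "**False Positive Considerations:**"]
  let parts := parts ++ fp_lines
  let parts := if fp_lines.isEmpty then parts ++ ["- Legitimate administrative activity matching the detection pattern"] else parts
  PySem.Str.join "\n" parts

-- ===== PRECONDITION & SPEC =====
def Spec_compose_sigma_explain_answer (rule_yaml : String) (technique_id : String) (out : String) : Prop := out = compose_sigma_explain_answer_alt rule_yaml technique_id
instance (rule_yaml : String) (technique_id : String) (out : String) : Decidable (Spec_compose_sigma_explain_answer rule_yaml technique_id out) := by unfold Spec_compose_sigma_explain_answer; infer_instance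

-- ===== CLAIM (what is proved, stated in full; the proofs are below) =====
def Claim_equal_compose_sigma_explain_answer : Prop := ∀ (rule_yaml : String) (technique_id : String), Dom_compose_sigma_explain_answer rule_yaml technique_id → Spec_compose_sigma_explain_answer rule_yaml technique_id (compose_sigma_explain_answer rule_yaml technique_id)

-- ===== LEMMAS AND PROOFS =====

-- the combined fold is the triple of the component folds
theorem foldl_bStepB (lines : List String) : ∀ (s : BState),
    lines.foldl bStepB s =
      ((lines.foldl (fStepB "title") s.1.1, lines.foldl (fStepB "description") s.1.2.1,
        lines.foldl (fStepB "level") s.1.2.2.1, lines.foldl (fStepB "status") s.1.2.2.2),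
       lines.foldl dStepB s.2.1, lines.foldl pStepB s.2.2) := by
  induction lines with
  | nil => intro s; rfl
  | cons line rest ih =>
    intro s
    simp only [List.foldl_cons]
    rw [ih]
    rfl

-- a decided field slot is frozen
theorem foldl_fStepB_some (field : String) (lines : List String) (v : Option String) :
    lines.foldl (fStepB field) (some v) = some v := by
  induction lines with
  | nil => rfl
  | cons line rest ih => simpa [fStepB] using ih

-- B's field slot, read through its fallback, is A's _yaml_field with its `or default`
theorem getB_foldl_eq (field d : String) (lines : List String) :
    pvGetB (lines.foldl (fStepB field) none) d = pvOrDefault (yamlFieldGo field lines) d := by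
  induction lines with
  | nil => rfl
  | cons line rest ih =>
    simp only [List.foldl_cons, yamlFieldGo, fStepB]
    by_cases h : pvIsField field line = true
    · simp [h, foldl_fStepB_some, pvGetB]
    · simp [h, ih]

-- once det_done, the detection component is frozen
theorem foldl_dStepB_done (lines : List String) : ∀ (b : Bool) (acc : List String),
    lines.foldl dStepB (b, true, acc) = (b, true, acc) := by
  induction lines with
  | nil => intro b acc; rfl
  | cons line rest ih => intro b acc; simpa [dStepB] using ih b acc

-- B's detection component collects exactly A's detection loop
theorem foldl_dStepB_eq (lines : List String) : ∀ (inDet : Bool) (acc : List String),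
    (lines.foldl dStepB (inDet, false, acc)).2.2 = acc ++ detLoopA inDet lines := by
  induction lines with
  | nil => intro inDet acc; simp [detLoopA]
  | cons line rest ih =>
    intro inDet acc
    simp only [List.foldl_cons, dStepB, detLoopA]
    by_cases h1 : pvIsDet (PySem.Str.strip line) = true
    · simp [h1, ih]
    · by_cases h2 : inDet
      · by_cases h3 : pvDetBreak line (PySem.Str.strip line) = true
        · simp [h1, h2, h3, foldl_dStepB_done]
        · simp [h1, h2, h3, ih]
      · simp [h1, h2, ih]

-- once fp_done, the false-positive component is frozen
theorem foldl_pStepB_done (lines : List String) : ∀ (b : Bool) (acc : List String),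
    lines.foldl pStepB (b, true, acc) = (b, true, acc) := by
  induction lines with
  | nil => intro b acc; rfl
  | cons line rest ih => intro b acc; simpa [pStepB] using ih b acc

-- B's false-positive component collects exactly A's false-positive loop's lines
theorem foldl_pStepB_eq (lines : List String) : ∀ (inFp : Bool) (acc : List String),
    (lines.foldl pStepB (inFp, false, acc)).2.2 = acc ++ (fpLoopA inFp lines).1 := by
  induction lines with
  | nil => intro inFp acc; simp [fpLoopA]
  | cons line rest ih =>
    intro inFp acc
    simp only [List.foldl_cons, pStepB, fpLoopA]
    by_cases h1 : pvIsFp (PySem.Str.strip line) = true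
    · simp [h1, ih]
    · by_cases h2 : inFp
      · by_cases h3 : pvIsDash (PySem.Str.strip line) = true
        · simp [h1, h2, h3, ih]
        · by_cases h4 : pvFpBreak (PySem.Str.strip line) = true
          · simp [h1, h2, h3, h4, foldl_pStepB_done]
          · simp [h1, h2, h3, h4, ih]
      · simp [h1, h2, ih]

-- A's fp_found flag is exactly "some false-positive line was collected"
theorem fpLoopA_found_iff (lines : List String) : ∀ (inFp : Bool),
    (fpLoopA inFp lines).2 = !(fpLoopA inFp lines).1.isEmpty := by
  induction lines with
  | nil => intro inFp; rfl
  | cons line rest ih =>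
    intro inFp
    simp only [fpLoopA]
    by_cases h1 : pvIsFp (PySem.Str.strip line) = true
    · simp [h1, ih]
    · by_cases h2 : inFp
      · by_cases h3 : pvIsDash (PySem.Str.strip line) = true
        · simp [h1, h2, h3]
        · by_cases h4 : pvFpBreak (PySem.Str.strip line) = true
          · simp [h1, h2, h3, h4]
          · simp [h1, h2, h3, h4, ih]
      · simp [h1, h2, ih]

-- ===== VERDICT (by name: the statement is the Claim_ definition above) =====
theorem compose_sigma_explain_answer_spec : Claim_equal_compose_sigma_explain_answer := by
  intro rule_yaml technique_id _
  show compose_sigma_explain_answer rule_yaml technique_id = compose_sigma_explain_answer_alt rule_yaml technique_id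
  simp only [compose_sigma_explain_answer, compose_sigma_explain_answer_alt, yamlField,
    foldl_bStepB, getB_foldl_eq, foldl_dStepB_eq, foldl_pStepB_eq, fpLoopA_found_iff,
    List.nil_append]
  cases (fpLoopA false (PySem.Str.splitlines rule_yaml)).1.isEmpty <;> simp
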